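-- pv_equiv track=rewrite | github.com/JoseDosSantos/NILMBenchmark | nilmtk_test.py | get_numbered_list
-- ===== SOURCE A (Python) =====
-- def get_numbered_list(l):
--     result = []
--     for fname in l:
--         orig = fname
--         i=1
--         while fname + ' ' + str(i) in result:
--             i += 1
--         result.append(fname  + ' ' + str(i))
--     return result
-- ===== SOURCE B (Python) =====
-- def get_numbered_list(l):
--     counts = {}
--     result = []
--     for fname in l:
--         c = counts.get(fname, 0) + 1
--         counts[fname] = c
--         result.append(fname + ' ' + str(c))
--     return result
-- ===== Notes on version B (the rewrite author's own statement) =====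
-- stated objective: faster
-- what changed: Replaces the quadratic append-with-membership-scan (retrying growing counters against the whole result list) by a single pass keeping a per-name occurrence counter in a dict, appending name + ' ' + count directly.
import Mathlib
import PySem

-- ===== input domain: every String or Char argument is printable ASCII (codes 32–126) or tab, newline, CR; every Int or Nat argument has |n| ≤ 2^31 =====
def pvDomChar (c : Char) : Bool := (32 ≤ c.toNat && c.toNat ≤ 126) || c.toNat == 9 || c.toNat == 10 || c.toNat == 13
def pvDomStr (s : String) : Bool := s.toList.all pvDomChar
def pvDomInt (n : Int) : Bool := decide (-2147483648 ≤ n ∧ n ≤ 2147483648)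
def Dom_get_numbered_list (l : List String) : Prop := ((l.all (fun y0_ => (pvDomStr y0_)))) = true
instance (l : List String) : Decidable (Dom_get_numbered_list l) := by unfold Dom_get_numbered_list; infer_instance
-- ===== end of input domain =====

-- B replaces A's quadratic retry-against-the-whole-result membership scan by a single pass
-- with a per-name counter dict (objective: faster).

-- ===== PORT A =====
-- A's inner while loop: starting from i, first i with fname + ' ' + str(i) not in result.
-- The fuel argument only makes the recursion structural; with fuel = result.length + 1 it
-- never runs out, since at most result.length values of i can be members.
def pvFindI (fname : String) (result : List String) : Int → Nat → Int
  | i, 0 => i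
  | i, fuel+1 =>
    if (fname ++ " " ++ PySem.Int.toStr i) ∈ result then pvFindI fname result (i+1) fuel
    else i

def get_numbered_list (l : List String) : List String :=
  l.foldl (fun result fname =>
    result ++ [fname ++ " " ++ PySem.Int.toStr (pvFindI fname result 1 (result.length + 1))]) []

-- ===== PORT B =====
def get_numbered_list_alt (l : List String) : List String :=
  (l.foldl (fun (st : PySem.Dict String Int × List String) fname =>
      let c := st.1.getD fname 0 + 1
      (st.1.insert fname c, st.2 ++ [fname ++ " " ++ PySem.Int.toStr c]))
    (PySem.Dict.empty, [])).2

-- ===== PRECONDITION & SPEC =====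
def Spec_get_numbered_list (l : List String) (out : List String) : Prop := out = get_numbered_list_alt l
instance (l : List String) (out : List String) : Decidable (Spec_get_numbered_list l out) := by unfold Spec_get_numbered_list; infer_instance

-- ===== CLAIM (what is proved, stated in full; the proofs are below) =====
def Claim_equal_get_numbered_list : Prop := ∀ (l : List String), Dom_get_numbered_list l → Spec_get_numbered_list l (get_numbered_list l)

-- ===== LEMMAS AND PROOFS =====

lemma pv_digitChar_isDigit (n : Nat) (h : n < 10) : (Nat.digitChar n).isDigit = true := by
  interval_cases n <;> decide

lemma pv_digitChar_toNat (n : Nat) (h : n < 10) : (Nat.digitChar n).toNat = 48 + n := by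
  interval_cases n <;> decide

lemma pv_toDigitsCore_append (fuel : Nat) : ∀ (n : Nat) (acc : List Char),
    Nat.toDigitsCore 10 fuel n acc = Nat.toDigitsCore 10 fuel n [] ++ acc := by
  induction fuel with
  | zero => intro n acc; simp [Nat.toDigitsCore]
  | succ f ih =>
    intro n acc
    simp only [Nat.toDigitsCore]
    by_cases h : n / 10 = 0
    · simp [h]
    · simp only [h, if_false]
      rw [ih (n / 10) ((n % 10).digitChar :: acc), ih (n / 10) [(n % 10).digitChar]]
      simp

lemma pv_mem_toDigitsCore (fuel : Nat) : ∀ (n : Nat) (acc : List Char) (c : Char),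
    c ∈ Nat.toDigitsCore 10 fuel n acc → c ∈ acc ∨ c.isDigit = true := by
  induction fuel with
  | zero => intro n acc c h; simp [Nat.toDigitsCore] at h; exact Or.inl h
  | succ f ih =>
    intro n acc c h
    simp only [Nat.toDigitsCore] at h
    by_cases h10 : n / 10 = 0
    · simp only [h10, if_true, List.mem_cons] at h
      rcases h with h | h
      · exact Or.inr (h ▸ pv_digitChar_isDigit _ (Nat.mod_lt _ (by omega)))
      · exact Or.inl h
    · simp only [h10, if_false] at h
      rcases ih _ _ _ h with h | h
      · rcases List.mem_cons.mp h with h | h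
        · exact Or.inr (h ▸ pv_digitChar_isDigit _ (Nat.mod_lt _ (by omega)))
        · exact Or.inl h
      · exact Or.inr h

def pvEv (a : Nat) (cs : List Char) : Nat := cs.foldl (fun a c => a * 10 + (c.toNat - 48)) a

lemma pv_ev_toDigitsCore (fuel : Nat) : ∀ n : Nat, n < fuel →
    pvEv 0 (Nat.toDigitsCore 10 fuel n []) = n := by
  induction fuel with
  | zero => omega
  | succ f ih =>
    intro n hn
    simp only [Nat.toDigitsCore]
    by_cases h10 : n / 10 = 0
    · have hlt : n < 10 := by omega
      simp only [h10, if_true]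
      simp [pvEv, pv_digitChar_toNat (n % 10) (Nat.mod_lt _ (by omega))]
      omega
    · simp only [h10, if_false]
      rw [pv_toDigitsCore_append]
      have hrec : pvEv 0 (Nat.toDigitsCore 10 f (n / 10) []) = n / 10 := by
        apply ih
        have h1 : 1 ≤ n := by omega
        have := Nat.div_lt_self (by omega : 0 < n) (by omega : 1 < 10)
        omega
      simp only [pvEv, List.foldl_append] at hrec ⊢
      rw [hrec]
      simp only [List.foldl_cons, List.foldl_nil]
      rw [pv_digitChar_toNat (n % 10) (Nat.mod_lt _ (by omega))]
      omega

lemma pv_toDigits_inj (m k : Nat) (h : Nat.toDigits 10 m = Nat.toDigits 10 k) : m = k := by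
  have hm := pv_ev_toDigitsCore (m + 1) m (by omega)
  have hk := pv_ev_toDigitsCore (k + 1) k (by omega)
  unfold Nat.toDigits at h
  rw [h] at hm
  rw [hm] at hk
  omega

lemma pv_isDigit_of_mem_toDigits (c : Char) (m : Nat) (h : c ∈ Nat.toDigits 10 m) :
    c.isDigit = true := by
  unfold Nat.toDigits at h
  rcases pv_mem_toDigitsCore _ _ _ _ h with h | h
  · simp at h
  · exact h

lemma pv_space_not_mem_toChars (i : Int) : ' ' ∉ PySem.Int.toChars i := by
  unfold PySem.Int.toChars
  split
  · intro h
    rcases List.mem_cons.mp h with h | h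
    · exact absurd h (by decide)
    · exact absurd (pv_isDigit_of_mem_toDigits _ _ h) (by decide)
  · intro h
    exact absurd (pv_isDigit_of_mem_toDigits _ _ h) (by decide)

lemma pv_toChars_inj (i j : Int) (h : PySem.Int.toChars i = PySem.Int.toChars j) : i = j := by
  unfold PySem.Int.toChars at h
  split_ifs at h with hi hj hj
  · injection h with h1 h2
    have := pv_toDigits_inj _ _ h2
    omega
  · exfalso
    have : '-' ∈ Nat.toDigits 10 j.toNat := by rw [← h]; exact List.mem_cons_self
    exact absurd (pv_isDigit_of_mem_toDigits _ _ this) (by decide)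
  · exfalso
    have : '-' ∈ Nat.toDigits 10 i.toNat := by rw [h]; exact List.mem_cons_self
    exact absurd (pv_isDigit_of_mem_toDigits _ _ this) (by decide)
  · have := pv_toDigits_inj _ _ h
    omega

lemma pv_sep_inj (a : List Char) : ∀ (b d1 d2 : List Char),
    a ++ ' ' :: d1 = b ++ ' ' :: d2 → ' ' ∉ d1 → ' ' ∉ d2 → a = b ∧ d1 = d2 := by
  induction a with
  | nil =>
    intro b d1 d2 h h1 h2
    cases b with
    | nil => simpa using h
    | cons c bs =>
      simp only [List.nil_append, List.cons_append, List.cons.injEq] at h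
      exact absurd (h.2 ▸ (by simp : ' ' ∈ bs ++ ' ' :: d2)) h1
  | cons c as ih =>
    intro b d1 d2 h h1 h2
    cases b with
    | nil =>
      simp only [List.cons_append, List.nil_append, List.cons.injEq] at h
      exact absurd (h.2.symm ▸ (by simp : ' ' ∈ as ++ ' ' :: d1)) h2
    | cons c' bs =>
      simp only [List.cons_append, List.cons.injEq] at h
      obtain ⟨hab, hd⟩ := ih bs d1 d2 h.2 h1 h2
      exact ⟨by rw [h.1, hab], hd⟩

lemma pv_toList_key (n : String) (i : Int) :
    (n ++ " " ++ PySem.Int.toStr i).toList = n.toList ++ ' ' :: PySem.Int.toChars i := by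
  simp [String.toList_append, PySem.Int.toList_toStr]

lemma pv_key_inj (n1 n2 : String) (i j : Int)
    (h : n1 ++ " " ++ PySem.Int.toStr i = n2 ++ " " ++ PySem.Int.toStr j) : n1 = n2 ∧ i = j := by
  have hl := congrArg String.toList h
  rw [pv_toList_key, pv_toList_key] at hl
  obtain ⟨ha, hd⟩ := pv_sep_inj _ _ _ _ hl (pv_space_not_mem_toChars i) (pv_space_not_mem_toChars j)
  exact ⟨String.toList_inj.mp ha, pv_toChars_inj _ _ hd⟩

lemma pv_findI_eq (fname : String) (R : List String) (c : Int)
    (hmem : ∀ j : Int, ((fname ++ " " ++ PySem.Int.toStr j) ∈ R) ↔ (1 ≤ j ∧ j ≤ c)) :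
    ∀ (fuel : Nat) (i : Int), 1 ≤ i → i ≤ c + 1 → (c + 1 - i).toNat < fuel →
    pvFindI fname R i fuel = c + 1 := by
  intro fuel
  induction fuel with
  | zero => intro i h1 h2 h3; omega
  | succ f ih =>
    intro i h1 h2 h3
    simp only [pvFindI]
    by_cases hb : (fname ++ " " ++ PySem.Int.toStr i) ∈ R
    · have hi := (hmem i).mp hb
      rw [if_pos hb]
      exact ih (i + 1) (by omega) (by omega) (by omega)
    · have hni : ¬(1 ≤ i ∧ i ≤ c) := fun hh => hb ((hmem i).mpr hh)
      rw [if_neg hb]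
      omega

lemma pv_main (l : List String) : ∀ (d : PySem.Dict String Int) (R : List String),
    (∀ (n : String) (i : Int), ((n ++ " " ++ PySem.Int.toStr i) ∈ R) ↔ (1 ≤ i ∧ i ≤ d.getD n 0)) →
    (∀ n : String, 0 ≤ d.getD n 0 ∧ d.getD n 0 ≤ R.length) →
    l.foldl (fun result fname =>
      result ++ [fname ++ " " ++ PySem.Int.toStr (pvFindI fname result 1 (result.length + 1))]) R
    = (l.foldl (fun (st : PySem.Dict String Int × List String) fname =>
        let c := st.1.getD fname 0 + 1
        (st.1.insert fname c, st.2 ++ [fname ++ " " ++ PySem.Int.toStr c])) (d, R)).2 := by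
  induction l with
  | nil => intro d R _ _; rfl
  | cons fname l ih =>
    intro d R hmem hbound
    simp only [List.foldl_cons]
    have hA : pvFindI fname R 1 (R.length + 1) = d.getD fname 0 + 1 := by
      apply pv_findI_eq fname R (d.getD fname 0) (fun j => hmem fname j)
      · exact le_refl 1
      · have := (hbound fname).1; omega
      · have := (hbound fname).2; omega
    rw [hA]
    apply ih
    · intro n i
      rw [List.mem_append, List.mem_singleton, PySem.Dict.getD_insert]
      constructor
      · rintro (h | h)
        · have := (hmem n i).mp h
          have hb := (hbound n).2
          split_ifs with he
          · subst he; omega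
          · omega
        · obtain ⟨hn, hi⟩ := pv_key_inj _ _ _ _ h
          subst hn
          rw [if_pos rfl]
          have := (hbound n).1
          omega
      · rintro ⟨h1, h2⟩
        split_ifs at h2 with he
        · subst he
          by_cases hlt : i ≤ d.getD n 0
          · exact Or.inl ((hmem n i).mpr ⟨h1, hlt⟩)
          · have : i = d.getD n 0 + 1 := by omega
            exact Or.inr (by rw [this])
        · exact Or.inl ((hmem n i).mpr ⟨h1, h2⟩)
    · intro n
      rw [PySem.Dict.getD_insert, List.length_append]
      have h1 := (hbound n).1
      have h2 := (hbound n).2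
      split_ifs with he
      · subst he; simp; omega
      · simp; omega

-- ===== VERDICT (by name: the statement is the Claim_ definition above) =====
theorem get_numbered_list_spec : Claim_equal_get_numbered_list := by
  intro l _
  unfold Spec_get_numbered_list get_numbered_list get_numbered_list_alt
  apply pv_main
  · intro n i
    simp [PySem.Dict.getD_empty]
    omega
  · intro n
    simp [PySem.Dict.getD_empty]
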